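-- pv_equiv track=rewrite | github.com/Gachon-Cocone-School/gcs-pulse | apps/server/app/routers/tournaments.py | _seeded_slots
-- ===== SOURCE A (Python) =====
-- def _seeded_slots(team_ids: list[int], bracket_size: int) -> list[int | None]:
--     """표준 토너먼트 시드 배정으로 브라켓 슬롯을 구성한다.
--
--     Seed 1은 Seed N과, Seed 2는 Seed (N-1)과 R1에서 대결하도록 배치해
--     강팀들이 후반부에만 만나고 LB 리매치를 최소화한다.
--
--     예) 8강: [S1,S8, S4,S5, S2,S7, S3,S6]
--     """
--     def _positions(n: int) -> list[int]:
--         if n == 2: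
--             return [1, 2]
--         prev = _positions(n // 2)
--         result: list[int] = []
--         for s in prev:
--             result.append(s)
--             result.append(n + 1 - s)
--         return result
--
--     padded: list[int | None] = list(team_ids) + [None] * (bracket_size - len(team_ids))
--     return [padded[p - 1] for p in _positions(bracket_size)]
-- ===== SOURCE B (Python) =====
-- def _seeded_slots(team_ids: list[int], bracket_size: int) -> list[int | None]:
--     """Iterative bracket build: record the halving chain, then grow the seed list bottom-up.
--
--     Rejects bracket sizes whose halving chain never reaches a 2-team final
--     (A's recursive helper does not terminate on those either).
--     """
--     sizes = []
--     m = bracket_size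
--     while m > 2:
--         sizes.append(m)
--         m //= 2
--     if m != 2:
--         raise ValueError("bracket_size does not reduce to a 2-team final")
--     result = [1, 2]
--     for n in reversed(sizes):
--         result = [x for s in result for x in (s, n + 1 - s)]
--     padded = list(team_ids) + [None] * (bracket_size - len(team_ids))
--     return [padded[p - 1] for p in result]
-- ===== Notes on version B (the rewrite author's own statement) =====
-- stated objective: alternative
-- what changed: Replaces the inner recursive _positions helper with two loops: one collecting the halving chain of bracket_size (with an explicit ValueError where A's recursion would not terminate), one growing the seed-position list bottom-up.
import Mathlib
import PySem

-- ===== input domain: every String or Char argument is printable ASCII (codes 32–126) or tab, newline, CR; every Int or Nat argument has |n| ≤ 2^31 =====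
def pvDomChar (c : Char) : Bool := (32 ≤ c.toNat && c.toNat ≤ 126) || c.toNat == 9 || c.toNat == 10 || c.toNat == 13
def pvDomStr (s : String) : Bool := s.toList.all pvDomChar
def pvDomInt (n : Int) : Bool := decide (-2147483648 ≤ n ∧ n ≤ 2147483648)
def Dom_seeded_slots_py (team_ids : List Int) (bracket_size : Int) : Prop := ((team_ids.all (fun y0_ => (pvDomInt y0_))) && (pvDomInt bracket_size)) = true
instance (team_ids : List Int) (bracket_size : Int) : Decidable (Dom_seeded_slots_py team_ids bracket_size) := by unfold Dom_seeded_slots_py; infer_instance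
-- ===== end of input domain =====

-- B replaces A's recursive `_positions` helper by two loops: record the halving chain, then grow
-- the seed-position list bottom-up (alternative decomposition, same cost).

-- ===== PORT A =====
-- A's recursive `_positions`; the fuel parameter only makes the recursion total in Lean
-- (inside Pre_ the fuel is never exhausted). `result.append(s); result.append(n+1-s)` is the
-- appended pair `r ++ [s, n + 1 - s]`.
def positionsA : Nat → Int → List Int
  | 0, _ => []
  | fuel + 1, n =>
    if n == 2 then [1, 2]
    else
      (positionsA fuel (PySem.Int.floordiv n 2)).foldl (fun r s => r ++ [s, n + 1 - s]) []

-- `padded[p - 1]`: inside Pre_ the index is always in range; `.getD none` only totalises the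
-- out-of-range (IndexError) case outside Pre_.
def seeded_slots_py (team_ids : List Int) (bracket_size : Int) : List (Option Int) :=
  let padded : List (Option Int) :=
    team_ids.map some ++ List.replicate (bracket_size - team_ids.length).toNat none
  (positionsA (bracket_size.toNat + 1) bracket_size).map
    (fun p => (PySem.List.pyGet? padded (p - 1)).getD none)

-- ===== PORT B =====
-- B's `while m > 2` loop collecting the halving chain (returns (sizes, final m)); the fuel only
-- makes the loop total in Lean and is never exhausted for bracket_size in the domain (m halves
-- every iteration).
def sizesLoop : Nat → Int → List Int → List Int × Int
  | 0, m, sizes => (sizes, m)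
  | fuel + 1, m, sizes =>
    if 2 < m then sizesLoop fuel (PySem.Int.floordiv m 2) (sizes ++ [m]) else (sizes, m)

-- `if m != 2: raise ValueError`: the raise branch returns [] here; inside Pre_ m = 2 always.
def seeded_slots_py_alt (team_ids : List Int) (bracket_size : Int) : List (Option Int) :=
  let sm := sizesLoop (bracket_size.toNat + 1) bracket_size []
  if sm.2 == 2 then
    let result := sm.1.reverse.foldl
      (fun result n => result.flatMap (fun s => [s, n + 1 - s])) [1, 2]
    let padded : List (Option Int) :=
      team_ids.map some ++ List.replicate (bracket_size - team_ids.length).toNat none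
    result.map (fun p => (PySem.List.pyGet? padded (p - 1)).getD none)
  else []

-- ===== PRECONDITION & SPEC =====
-- Pre_ excludes exactly the inputs where A raises RecursionError: A's `_positions` terminates
-- iff the floor-halving chain of bracket_size hits exactly 2, i.e. 2·2^j ≤ bracket_size < 3·2^j
-- for some j. The bound j < log2 bracket_size is implied by 2^(j+1) ≤ bracket_size, so it
-- excludes nothing — it only makes the existential decidable (and quick to evaluate).
def Pre_seeded_slots_py (team_ids : List Int) (bracket_size : Int) : Prop :=
  ∃ j ∈ Finset.range bracket_size.toNat.log2, (2 : Int) ^ (j + 1) ≤ bracket_size ∧ bracket_size < 3 * 2 ^ j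

instance (team_ids : List Int) (bracket_size : Int) : Decidable (Pre_seeded_slots_py team_ids bracket_size) := by
  unfold Pre_seeded_slots_py; infer_instance

def pvWitness_seeded_slots_py : List Int × Int := ([10, 20, 30], 5)

def Spec_seeded_slots_py (team_ids : List Int) (bracket_size : Int) (out : List (Option Int)) : Prop := out = seeded_slots_py_alt team_ids bracket_size
instance (team_ids : List Int) (bracket_size : Int) (out : List (Option Int)) : Decidable (Spec_seeded_slots_py team_ids bracket_size out) := by unfold Spec_seeded_slots_py; infer_instance

-- ===== CLAIM (what is proved, stated in full; the proofs are below) =====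
def Claim_equal_seeded_slots_py : Prop := ∀ (team_ids : List Int) (bracket_size : Int), Dom_seeded_slots_py team_ids bracket_size → Pre_seeded_slots_py team_ids bracket_size → Spec_seeded_slots_py team_ids bracket_size (seeded_slots_py team_ids bracket_size)

-- ===== LEMMAS AND PROOFS =====

lemma sizesLoop_acc : ∀ (f : Nat) (m : Int) (acc : List Int),
    sizesLoop f m acc = (acc ++ (sizesLoop f m []).1, (sizesLoop f m []).2) := by
  intro f
  induction f with
  | zero => intro m acc; simp [sizesLoop]
  | succ f' ih =>
    intro m acc
    by_cases h : 2 < m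
    · simp only [sizesLoop, if_pos h]
      rw [ih _ (acc ++ [m]), ih _ ([] ++ [m])]
      simp
    · simp [sizesLoop, if_neg h]

lemma floordiv_two_bounds {n lo hi : Int} (h1 : lo * 2 ≤ n) (h2 : n < hi * 2) :
    lo ≤ PySem.Int.floordiv n 2 ∧ PySem.Int.floordiv n 2 < hi := by
  constructor
  · exact (PySem.Int.le_floordiv_iff_mul_le (by norm_num)).mpr h1
  · exact (PySem.Int.floordiv_lt_iff_lt_mul (by norm_num)).mpr h2

-- the two position computations agree on every n whose halving chain hits 2
lemma positions_eq : ∀ (j : Nat) (n : Int) (fA fB : Nat),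
    (2 : Int) ^ (j + 1) ≤ n → n < 3 * 2 ^ j → j + 1 ≤ fA → j + 1 ≤ fB →
    positionsA fA n = ((sizesLoop fB n []).1).reverse.foldl
      (fun result m => result.flatMap (fun s => [s, m + 1 - s])) [1, 2] ∧
    (sizesLoop fB n []).2 = 2 := by
  intro j
  induction j with
  | zero =>
    intro n fA fB h1 h2 hA hB
    have hn : n = 2 := by norm_num at h1 h2; omega
    subst hn
    obtain ⟨fA', rfl⟩ : ∃ f', fA = f' + 1 := ⟨fA - 1, by omega⟩
    obtain ⟨fB', rfl⟩ : ∃ f', fB = f' + 1 := ⟨fB - 1, by omega⟩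
    constructor <;> simp [positionsA, sizesLoop]
  | succ j ih =>
    intro n fA fB h1 h2 hA hB
    obtain ⟨fA', rfl⟩ : ∃ f', fA = f' + 1 := ⟨fA - 1, by omega⟩
    obtain ⟨fB', rfl⟩ : ∃ f', fB = f' + 1 := ⟨fB - 1, by omega⟩
    have hpow : (4 : Int) ≤ 2 ^ (j + 1 + 1) := by
      calc (4 : Int) = 2 ^ 2 := by norm_num
      _ ≤ 2 ^ (j + 1 + 1) := pow_le_pow_right₀ (by norm_num) (by omega)
    have hgt : 2 < n := by omega
    have hne : (n == 2) = false := by simp only [beq_eq_false_iff_ne, ne_eq]; omega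
    have hb1 : (2 : Int) ^ (j + 1) * 2 ≤ n := by rw [← pow_succ]; exact h1
    have hb2 : n < 3 * 2 ^ j * 2 := by rw [mul_assoc, ← pow_succ]; exact h2
    have hmid := floordiv_two_bounds hb1 hb2
    obtain ⟨ihEq, ihM⟩ := ih (PySem.Int.floordiv n 2) fA' fB' hmid.1 hmid.2 (by omega) (by omega)
    constructor
    · -- A side
      simp only [positionsA, hne, Bool.false_eq_true, if_false]
      rw [ihEq, PySem.List.foldl_append_eq_flatMap]
      -- B side
      simp only [sizesLoop, if_pos hgt]
      rw [sizesLoop_acc fB' _ ([] ++ [n])]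
      simp [List.foldl_append]
    · simp only [sizesLoop, if_pos hgt]
      rw [sizesLoop_acc fB' _ ([] ++ [n])]
      exact ihM

-- ===== VERDICT (by name: the statement is the Claim_ definition above) =====
theorem seeded_slots_py_spec : Claim_equal_seeded_slots_py := by
  intro team_ids bracket_size _hDom hPre
  obtain ⟨j, _hjb, h1, h2⟩ := hPre
  unfold Spec_seeded_slots_py seeded_slots_py seeded_slots_py_alt
  have hjn : (j + 1 : Nat) < 2 ^ (j + 1) := Nat.lt_two_pow_self
  have hj : ((j : Int) + 1) ≤ 2 ^ (j + 1) := by exact_mod_cast hjn.le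
  have hfuel : j + 1 ≤ bracket_size.toNat + 1 := by
    have : ((j : Int) + 1) ≤ bracket_size := le_trans hj h1
    omega
  obtain ⟨hEq, hM⟩ := positions_eq j bracket_size (bracket_size.toNat + 1)
    (bracket_size.toNat + 1) h1 h2 hfuel hfuel
  simp only [hM, beq_self_eq_true, if_true, hEq]
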